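-- pv_equiv track=rewrite | github.com/rtviii/riboxyz | api/ribctl/lib/mod_transpose_bsites.py | hl_ixs
-- ===== SOURCE A (Python) =====
-- from typing import List, Union
--
-- def hl_ixs(sequence:str,  ixs:List[int]):
-- 	"""Highlight indices"""
-- 	CRED = '\033[91m'
-- 	CEND = '\033[0m'
-- 	_ = ''
-- 	for i,v in enumerate(sequence):
-- 		if i in ixs: _ += CRED + v +CEND
-- 		else: 	 	 _ += v
-- 	return _
-- ===== SOURCE B (Python) =====
-- def hl_ixs(sequence: str, ixs):
--     """Highlight indices"""
--     CRED = '\033[91m'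
--     CEND = '\033[0m'
--     chars = list(sequence)
--     for i in set(ixs):
--         if 0 <= i < len(sequence):
--             chars[i] = CRED + chars[i] + CEND
--     return ''.join(chars)
-- ===== Notes on version B (the rewrite author's own statement) =====
-- stated objective: faster
-- what changed: Instead of scanning the whole sequence and testing 'i in ixs' with a linear list scan per character, B mutates a char list at the (deduplicated, in-range) indices only and joins once.
import Mathlib
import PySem

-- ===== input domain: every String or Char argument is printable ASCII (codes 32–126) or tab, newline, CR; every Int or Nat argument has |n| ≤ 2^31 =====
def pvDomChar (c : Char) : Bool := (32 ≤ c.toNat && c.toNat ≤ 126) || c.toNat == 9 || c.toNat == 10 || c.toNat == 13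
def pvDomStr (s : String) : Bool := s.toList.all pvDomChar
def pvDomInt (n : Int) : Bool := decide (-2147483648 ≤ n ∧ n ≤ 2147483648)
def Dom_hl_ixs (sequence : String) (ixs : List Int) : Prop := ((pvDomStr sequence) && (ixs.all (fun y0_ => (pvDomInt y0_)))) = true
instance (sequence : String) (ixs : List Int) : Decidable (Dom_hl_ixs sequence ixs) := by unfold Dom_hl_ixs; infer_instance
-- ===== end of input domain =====

-- B rewrites A's per-character 'i in ixs' list scan as one pass over the deduplicated
-- indices mutating a char list, then a single join (objective: faster, linear vs quadratic).

-- ===== PORT A =====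
def pvCRED : List Char := "\x1b[91m".toList
def pvCEND : List Char := "\x1b[0m".toList

def hl_ixs (sequence : String) (ixs : List Int) : String :=
  String.ofList ((PySem.List.enumerate sequence.toList 0).foldl
    (fun acc p => if ixs.contains p.1 then acc ++ (pvCRED ++ [p.2] ++ pvCEND) else acc ++ [p.2]) [])

-- ===== PORT B =====
-- one iteration of B's loop body: 'if 0 <= i < len(sequence): chars[i] = CRED + chars[i] + CEND'
def pvWrapStep (n : Int) (cs : List (List Char)) (i : Int) : List (List Char) :=
  if 0 ≤ i ∧ i < n then PySem.List.pySetD cs i (pvCRED ++ PySem.List.pyGetD cs i [] ++ pvCEND) else cs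

def hl_ixs_alt (sequence : String) (ixs : List Int) : String :=
  let n : Int := sequence.toList.length
  let chars : List (List Char) := sequence.toList.map (fun c => [c])
  String.ofList ((PySem.Set.ofList ixs).foldl (pvWrapStep n) chars).flatten

-- ===== PRECONDITION & SPEC =====
def Spec_hl_ixs (sequence : String) (ixs : List Int) (out : String) : Prop := out = hl_ixs_alt sequence ixs
instance (sequence : String) (ixs : List Int) (out : String) : Decidable (Spec_hl_ixs sequence ixs out) := by unfold Spec_hl_ixs; infer_instance

-- ===== CLAIM (what is proved, stated in full; the proofs are below) =====
def Claim_equal_hl_ixs : Prop := ∀ (sequence : String) (ixs : List Int), Dom_hl_ixs sequence ixs → Spec_hl_ixs sequence ixs (hl_ixs sequence ixs)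

-- ===== LEMMAS AND PROOFS =====

-- length is preserved by B's fold
theorem pvFold_length (n : Int) (L : List Int) (cs : List (List Char)) :
    (L.foldl (pvWrapStep n) cs).length = cs.length := by
  induction L generalizing cs with
  | nil => rfl
  | cons i L ih =>
      simp only [List.foldl_cons]
      rw [ih]
      unfold pvWrapStep
      split
      · exact PySem.List.length_pySetD cs i _
      · rfl

-- element j of B's fold result: wrapped iff j ∈ L (when the fold runs over distinct
-- indices and n is the list's length)
theorem pvFold_getElem (n : Int) (L : List Int) : ∀ (cs : List (List Char)), L.Nodup →
    n = (cs.length : Int) → ∀ (j : Nat) (hj : j < cs.length),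
    (L.foldl (pvWrapStep n) cs)[j]? =
      some (if (j : Int) ∈ L then pvCRED ++ cs[j] ++ pvCEND else cs[j]) := by
  induction L with
  | nil =>
      intro cs _ _ j hj
      simp [List.getElem?_eq_getElem hj]
  | cons i L ih =>
      intro cs hnd hn j hj
      rcases List.nodup_cons.mp hnd with ⟨hi, hL⟩
      simp only [List.foldl_cons]
      by_cases hrng : 0 ≤ i ∧ i < n
      · have hilt : i.toNat < cs.length := by omega
        have hstep : pvWrapStep n cs i =
            cs.set i.toNat (pvCRED ++ cs[i.toNat] ++ pvCEND) := by
          unfold pvWrapStep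
          rw [if_pos hrng, PySem.List.pySetD_of_nonneg cs _ hrng.1,
              PySem.List.pyGetD_eq_getElem cs [] hrng.1 (by omega)]
        rw [hstep]
        rw [ih _ hL (by simpa using hn) j (by simpa using hj)]
        by_cases hji : (j : Int) = i
        · have hjt : j = i.toNat := by omega
          have hjL : (j : Int) ∉ L := hji ▸ hi
          rw [if_neg hjL, if_pos (show (j : Int) ∈ i :: L by rw [hji]; exact List.mem_cons_self)]
          subst hjt
          rw [List.getElem_set_self]
        · have hjt : i.toNat ≠ j := by omega
          rw [List.getElem_set_ne hjt]
          simp [hji]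
      · have hstep : pvWrapStep n cs i = cs := by unfold pvWrapStep; rw [if_neg hrng]
        rw [hstep, ih cs hL hn j hj]
        have hji : (j : Int) ≠ i := by omega
        simp [hji]

-- ===== VERDICT (by name: the statement is the Claim_ definition above) =====
theorem hl_ixs_spec : Claim_equal_hl_ixs := by
  intro sequence ixs _
  unfold Spec_hl_ixs hl_ixs hl_ixs_alt
  set xs := sequence.toList with hxs
  congr 1
  -- A's fold is a flatMap over the enumeration
  have hfun : (fun (acc : List Char) (p : Int × Char) =>
      if ixs.contains p.1 then acc ++ (pvCRED ++ [p.2] ++ pvCEND) else acc ++ [p.2]) =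
      (fun acc p => acc ++ (if ixs.contains p.1 then pvCRED ++ [p.2] ++ pvCEND else [p.2])) := by
    funext acc p; split <;> rfl
  rw [hfun, PySem.List.foldl_append_eq_flatMap
        (fun p : Int × Char => if ixs.contains p.1 then pvCRED ++ [p.2] ++ pvCEND else [p.2])]
  simp only [List.nil_append, List.flatMap_def]
  congr 1
  -- both piece lists agree elementwise
  apply List.ext_getElem?
  intro j
  by_cases hj : j < xs.length
  · rw [pvFold_getElem _ (PySem.Set.ofList ixs) _ (PySem.Set.nodup_ofList ixs)
        (by simp) j (by simpa using hj)]
    simp only [List.getElem?_map, PySem.List.getElem?_enumerate, List.getElem?_eq_getElem hj,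
      Option.map_some, List.getElem_map]
    have hmem : ((j : Int) ∈ PySem.Set.ofList ixs) ↔ ixs.contains (j : Int) = true := by
      rw [PySem.Set.mem_ofList]; simp
    simp [hmem]
  · rw [List.getElem?_eq_none
      (by simp only [List.length_map, PySem.List.length_enumerate]; omega)]
    rw [List.getElem?_eq_none (by rw [pvFold_length]; simpa using Nat.le_of_not_lt hj)]
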